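-- pv_equiv track=rewrite | github.com/joojinhyeok/coding_test | 프로그래머스/0/120866. 안전지대/안전지대.py | solution
-- ===== SOURCE A (Python) =====
-- def solution(board):
--     n = len(board)
--     answer = 0
--
--     # 1. 모든 칸을 하나씩 확인 (r행, c열)
--     for r in range(n):
--         for c in range(n):
--
--             # 2. 일단 현재 칸은 안전하다고 가정
--             is_safe = True
--
--             # 3. 현재 칸의 주변 3x3 구역을 탐색
--             for dr in range(-1, 2):
--                 for dc in range(-1, 2):
--                     nr, nc = r + dr, c + dc
--
--                     # 지도 범위를 벗어나지 않는지 확인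
--                     if 0 <= nr < n and 0 <= nc < n:
--                         # 주변에 지뢰(1)가 하나라도 있으면
--                         if board[nr][nc] == 1:
--                             # 이 칸은 안전하지 않음!
--                             is_safe = False
--                             break # 더 찾아볼 필요 없으니 탐색 중단
--                 if not is_safe:
--                     break
--
--             # 4. 모든 주변 칸을 확인했는데도 is_safe가 True라면, 진짜 안전한 지역임
--             if is_safe:
--                 answer += 1
--
--     return answer
-- ===== SOURCE B (Python) =====
-- def solution(board):
--     n = len(board)
--     danger = set()
--     for r in range(n):
--         for c in range(n):
--             if board[r][c] == 1:
--                 for dr in (-1, 0, 1):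
--                     for dc in (-1, 0, 1):
--                         nr, nc = r + dr, c + dc
--                         if 0 <= nr < n and 0 <= nc < n:
--                             danger.add((nr, nc))
--     return n * n - len(danger)
-- ===== Notes on version B (the rewrite author's own statement) =====
-- stated objective: faster
-- what changed: Instead of probing every cell's 3x3 neighborhood for a mine, B makes one pass over the grid spreading danger outward from each mine into a set of dangerous coordinates and returns n*n minus the set's size; the 9-way probe per cell is replaced by one cell test plus work proportional to the number of mines.
-- outside the precondition, e.g. on solution([[1], [1, 1]]): A returns 0, B raises IndexError
import Mathlib
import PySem

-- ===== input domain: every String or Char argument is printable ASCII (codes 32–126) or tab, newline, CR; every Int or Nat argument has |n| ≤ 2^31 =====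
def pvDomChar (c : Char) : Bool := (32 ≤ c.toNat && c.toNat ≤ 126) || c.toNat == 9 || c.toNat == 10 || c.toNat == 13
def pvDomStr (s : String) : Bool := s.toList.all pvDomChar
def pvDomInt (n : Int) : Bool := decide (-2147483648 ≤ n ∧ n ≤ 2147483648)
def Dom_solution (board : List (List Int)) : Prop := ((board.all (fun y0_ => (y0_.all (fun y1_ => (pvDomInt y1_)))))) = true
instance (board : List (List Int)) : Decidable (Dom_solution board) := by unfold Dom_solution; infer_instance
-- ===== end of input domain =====

-- B replaces A's per-cell 3x3 probe by one pass spreading danger from each mine into a set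
-- of dangerous coordinates, returning n*n minus the set's size (alternative decomposition).


-- ===== PORT A =====
-- cell lookup board[r][c]; on Pre_ inputs every index used is in range, so the defaults are never read
def pvCell (board : List (List Int)) (r c : Int) : Int :=
  PySem.List.pyGetD (PySem.List.pyGetD board r []) c 0

def solution (board : List (List Int)) : Int :=
  let n : Int := board.length
  (PySem.List.pyRange 0 n 1).foldl (fun answer r =>
    (PySem.List.pyRange 0 n 1).foldl (fun answer c =>
      -- the double break out of the dr/dc scan once a mine is seen = the scan finds no mine
      let is_safe : Bool :=
        (PySem.List.pyRange (-1) 2 1).all (fun dr =>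
          (PySem.List.pyRange (-1) 2 1).all (fun dc =>
            !(decide (0 ≤ r + dr ∧ r + dr < n ∧ 0 ≤ c + dc ∧ c + dc < n) &&
              (pvCell board (r + dr) (c + dc) == 1))))
      if is_safe then answer + 1 else answer) answer) 0

-- ===== PORT B =====
def solution_alt (board : List (List Int)) : Int :=
  let n : Int := board.length
  let danger : PySem.Set (Int × Int) :=
    (PySem.List.pyRange 0 n 1).foldl (fun s r =>
      (PySem.List.pyRange 0 n 1).foldl (fun s c =>
        if pvCell board r c == 1 then
          (([-1, 0, 1] : List Int)).foldl (fun s dr =>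
            (([-1, 0, 1] : List Int)).foldl (fun s dc =>
              let nr := r + dr
              let nc := c + dc
              if 0 ≤ nr ∧ nr < n ∧ 0 ≤ nc ∧ nc < n then PySem.Set.add s (nr, nc) else s) s) s
        else s) s) PySem.Set.empty
  n * n - PySem.Set.len danger

-- ===== PRECONDITION & SPEC =====
-- Pre_ excludes boards having a row shorter than len(board): there A's (and B's) row indexing
-- can raise IndexError (A returns only when an earlier mine happens to break the scan first).
def Pre_solution (board : List (List Int)) : Prop :=
  ∀ row ∈ board, board.length ≤ row.length
instance (board : List (List Int)) : Decidable (Pre_solution board) := by unfold Pre_solution; infer_instance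

def pvWitness_solution : List (List Int) := [[1, 0], [0, 0]]

def Spec_solution (board : List (List Int)) (out : Int) : Prop := out = solution_alt board
instance (board : List (List Int)) (out : Int) : Decidable (Spec_solution board out) := by unfold Spec_solution; infer_instance

-- ===== CLAIM (what is proved, stated in full; the proofs are below) =====
def Claim_equal_solution : Prop := ∀ (board : List (List Int)), Dom_solution board → Pre_solution board → Spec_solution board (solution board)

-- ===== LEMMAS AND PROOFS =====

-- a cell (r,c) has a mine somewhere in its in-bounds 3x3 neighborhood
def pvDanger (board : List (List Int)) (n r c : Int) : Bool :=
  (([-1, 0, 1] : List Int)).any (fun dr =>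
    (([-1, 0, 1] : List Int)).any (fun dc =>
      decide (0 ≤ r + dr ∧ r + dr < n ∧ 0 ≤ c + dc ∧ c + dc < n) && (pvCell board (r + dr) (c + dc) == 1)))

-- the grid of all coordinates
def pvGrid (n : Int) : List (Int × Int) :=
  (PySem.List.pyRange 0 n 1).flatMap (fun r => (PySem.List.pyRange 0 n 1).map (fun c => (r, c)))

-- B's danger set, named for the proofs (definitionally the set solution_alt builds)
def pvDangerSet (board : List (List Int)) (n : Int) : PySem.Set (Int × Int) :=
  (PySem.List.pyRange 0 n 1).foldl (fun s r =>
    (PySem.List.pyRange 0 n 1).foldl (fun s c =>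
      if pvCell board r c == 1 then
        (([-1, 0, 1] : List Int)).foldl (fun s dr =>
          (([-1, 0, 1] : List Int)).foldl (fun s dc =>
            let nr := r + dr
            let nc := c + dc
            if 0 ≤ nr ∧ nr < n ∧ 0 ≤ nc ∧ nc < n then PySem.Set.add s (nr, nc) else s) s) s
      else s) s) PySem.Set.empty

lemma pvGrid_mem (n : Int) (p : Int × Int) :
    p ∈ pvGrid n ↔ 0 ≤ p.1 ∧ p.1 < n ∧ 0 ≤ p.2 ∧ p.2 < n := by
  obtain ⟨a, b⟩ := p
  simp [pvGrid, List.mem_flatMap, PySem.List.mem_pyRange_one, Prod.ext_iff]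
  aesop

lemma pvGrid_nodup (n : Int) : (pvGrid n).Nodup := by
  have h : pvGrid n = (PySem.List.pyRange 0 n 1) ×ˢ (PySem.List.pyRange 0 n 1) := rfl
  rw [h]
  exact List.Nodup.product (PySem.List.nodup_pyRange_one _ _) (PySem.List.nodup_pyRange_one _ _)

lemma pvGrid_length (n : Int) : (pvGrid n).length = n.toNat * n.toNat := by
  simp [pvGrid, List.length_flatMap, PySem.List.length_pyRange_one]

-- A's inner 3x3 "all clear" scan is the negation of pvDanger
lemma pv_safe_eq (board : List (List Int)) (n r c : Int) :
    ((PySem.List.pyRange (-1) 2 1).all (fun dr =>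
      (PySem.List.pyRange (-1) 2 1).all (fun dc =>
        !(decide (0 ≤ r + dr ∧ r + dr < n ∧ 0 ≤ c + dc ∧ c + dc < n) &&
          (pvCell board (r + dr) (c + dc) == 1)))))
    = ! pvDanger board n r c := by
  have h : PySem.List.pyRange (-1) 2 1 = [-1, 0, 1] := rfl
  simp only [h, pvDanger, List.all_cons, List.any_cons, List.all_nil, List.any_nil,
    Bool.not_or, Bool.and_true, Bool.or_false]

-- A's double counting loop is a countP over the grid
lemma pv_outer (board : List (List Int)) (n : Int) (l : List Int) : ∀ a : Int,
    l.foldl (fun answer r => (PySem.List.pyRange 0 n 1).foldl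
      (fun answer c => if ! pvDanger board n r c then answer + 1 else answer) answer) a
    = a + ((l.flatMap (fun r => (PySem.List.pyRange 0 n 1).map (fun c => (r, c)))).countP
        (fun p => ! pvDanger board n p.1 p.2) : Int) := by
  induction l with
  | nil => simp
  | cons r t ih =>
    intro a
    rw [List.foldl_cons, PySem.List.foldl_if_add_one, ih]
    simp only [List.flatMap_cons, List.countP_append, List.countP_map, Function.comp_def]
    push_cast
    omega

lemma pv_solutionA_eq (board : List (List Int)) :
    solution board
      = ((pvGrid board.length).countP (fun p => ! pvDanger board board.length p.1 p.2) : Int) := by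
  unfold solution
  simp only [pv_safe_eq]
  rw [pv_outer]
  simp [pvGrid]

-- membership propagated through a set-building foldl
theorem pv_mem_foldl {α β : Type} [BEq α] (l : List β) (step : PySem.Set α → β → PySem.Set α)
    (Q : β → Prop) (p : α)
    (H : ∀ s x, x ∈ l → (p ∈ step s x ↔ p ∈ s ∨ Q x)) :
    ∀ s, p ∈ l.foldl step s ↔ p ∈ s ∨ ∃ x ∈ l, Q x := by
  induction l with
  | nil => simp
  | cons y t ih =>
    intro s
    rw [List.foldl_cons, ih (fun s x hx => H s x (List.mem_cons_of_mem _ hx)),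
      H s y (List.mem_cons_self)]
    simp only [List.mem_cons]
    constructor
    · rintro (⟨h | h⟩ | ⟨x, hx, hq⟩)
      · exact Or.inl h
      · exact Or.inr ⟨y, Or.inl rfl, h⟩
      · exact Or.inr ⟨x, Or.inr hx, hq⟩
    · rintro (h | ⟨x, (rfl | hx), hq⟩)
      · exact Or.inl (Or.inl h)
      · exact Or.inl (Or.inr hq)
      · exact Or.inr ⟨x, hx, hq⟩

theorem pv_nodup_foldl {α β : Type} (l : List β) (step : List α → β → List α)
    (H : ∀ s x, s.Nodup → (step s x).Nodup) :
    ∀ s : List α, s.Nodup → (l.foldl step s).Nodup := by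
  induction l with
  | nil => exact fun s h => h
  | cons y t ih => intro s hs; rw [List.foldl_cons]; exact ih _ (H s y hs)

lemma pv_mem_dangerSet (board : List (List Int)) (n : Int) (p : Int × Int) :
    p ∈ pvDangerSet board n ↔ ∃ r ∈ PySem.List.pyRange 0 n 1, ∃ c ∈ PySem.List.pyRange 0 n 1,
      pvCell board r c = 1 ∧ ∃ dr ∈ ([-1, 0, 1] : List Int), ∃ dc ∈ ([-1, 0, 1] : List Int),
        (0 ≤ r + dr ∧ r + dr < n ∧ 0 ≤ c + dc ∧ c + dc < n) ∧ p = (r + dr, c + dc) := by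
  have Hdc : ∀ (r c dr : Int) (s : PySem.Set (Int × Int)),
      p ∈ (([-1, 0, 1] : List Int)).foldl (fun s dc =>
            let nr := r + dr
            let nc := c + dc
            if 0 ≤ nr ∧ nr < n ∧ 0 ≤ nc ∧ nc < n then PySem.Set.add s (nr, nc) else s) s
      ↔ p ∈ s ∨ ∃ dc ∈ ([-1, 0, 1] : List Int),
          (0 ≤ r + dr ∧ r + dr < n ∧ 0 ≤ c + dc ∧ c + dc < n) ∧ p = (r + dr, c + dc) := by
    intro r c dr s
    refine pv_mem_foldl _ _ _ p (fun s dc _ => ?_) s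
    by_cases h : 0 ≤ r + dr ∧ r + dr < n ∧ 0 ≤ c + dc ∧ c + dc < n
    · rw [if_pos h, PySem.Set.mem_add]; tauto
    · rw [if_neg h]; tauto
  have Hdr : ∀ (r c : Int) (s : PySem.Set (Int × Int)),
      p ∈ (([-1, 0, 1] : List Int)).foldl (fun s dr =>
            (([-1, 0, 1] : List Int)).foldl (fun s dc =>
              let nr := r + dr
              let nc := c + dc
              if 0 ≤ nr ∧ nr < n ∧ 0 ≤ nc ∧ nc < n then PySem.Set.add s (nr, nc) else s) s) s
      ↔ p ∈ s ∨ ∃ dr ∈ ([-1, 0, 1] : List Int), ∃ dc ∈ ([-1, 0, 1] : List Int),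
          (0 ≤ r + dr ∧ r + dr < n ∧ 0 ≤ c + dc ∧ c + dc < n) ∧ p = (r + dr, c + dc) :=
    fun r c s => pv_mem_foldl _ _ _ p (fun s dr _ => Hdc r c dr s) s
  have Hc : ∀ (r : Int) (s : PySem.Set (Int × Int)),
      p ∈ (PySem.List.pyRange 0 n 1).foldl (fun s c =>
            if pvCell board r c == 1 then
              (([-1, 0, 1] : List Int)).foldl (fun s dr =>
                (([-1, 0, 1] : List Int)).foldl (fun s dc =>
                  let nr := r + dr
                  let nc := c + dc
                  if 0 ≤ nr ∧ nr < n ∧ 0 ≤ nc ∧ nc < n then PySem.Set.add s (nr, nc) else s) s) s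
            else s) s
      ↔ p ∈ s ∨ ∃ c ∈ PySem.List.pyRange 0 n 1, pvCell board r c = 1 ∧
          ∃ dr ∈ ([-1, 0, 1] : List Int), ∃ dc ∈ ([-1, 0, 1] : List Int),
            (0 ≤ r + dr ∧ r + dr < n ∧ 0 ≤ c + dc ∧ c + dc < n) ∧ p = (r + dr, c + dc) := by
    intro r s
    refine pv_mem_foldl _ _ _ p (fun s c _ => ?_) s
    by_cases h : pvCell board r c = 1
    · rw [if_pos (by simp [h] : (pvCell board r c == 1) = true), Hdr r c s]; simp [h]
    · rw [if_neg (by simp [h] : ¬ (pvCell board r c == 1) = true)]; simp [h]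
  have Hr := pv_mem_foldl (PySem.List.pyRange 0 n 1) _
    (fun r => ∃ c ∈ PySem.List.pyRange 0 n 1, pvCell board r c = 1 ∧
      ∃ dr ∈ ([-1, 0, 1] : List Int), ∃ dc ∈ ([-1, 0, 1] : List Int),
        (0 ≤ r + dr ∧ r + dr < n ∧ 0 ≤ c + dc ∧ c + dc < n) ∧ p = (r + dr, c + dc)) p
    (fun s r _ => Hc r s) PySem.Set.empty
  unfold pvDangerSet
  rw [Hr]
  simp [PySem.Set.empty]

lemma pv_neg_mem {x : Int} (h : x ∈ ([-1, 0, 1] : List Int)) : -x ∈ ([-1, 0, 1] : List Int) := by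
  fin_cases h <;> decide

-- danger-spreading from mines marks exactly the dangerous grid cells
lemma pv_dangerSet_iff_filter (board : List (List Int)) (n : Int) (p : Int × Int) :
    p ∈ pvDangerSet board n ↔ p ∈ (pvGrid n).filter (fun q => pvDanger board n q.1 q.2) := by
  rw [pv_mem_dangerSet, List.mem_filter, pvGrid_mem]
  constructor
  · rintro ⟨r, hr, c, hc, hm, dr, hdr, dc, hdc, hb, rfl⟩
    rw [PySem.List.mem_pyRange_one] at hr hc
    refine ⟨⟨hb.1, hb.2.1, hb.2.2.1, hb.2.2.2⟩, ?_⟩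
    simp only [pvDanger, List.any_eq_true, Bool.and_eq_true, decide_eq_true_eq, beq_iff_eq]
    refine ⟨-dr, pv_neg_mem hdr, -dc, pv_neg_mem hdc, ?_, ?_⟩
    · exact ⟨by omega, by omega, by omega, by omega⟩
    · show pvCell board (r + dr + -dr) (c + dc + -dc) = 1
      have h1 : r + dr + -dr = r := by omega
      have h2 : c + dc + -dc = c := by omega
      rw [h1, h2]; exact hm
  · rintro ⟨hp, hd⟩
    simp only [pvDanger, List.any_eq_true, Bool.and_eq_true, decide_eq_true_eq, beq_iff_eq] at hd
    obtain ⟨dr, hdr, dc, hdc, hb, hm⟩ := hd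
    refine ⟨p.1 + dr, ?_, p.2 + dc, ?_, hm, -dr, pv_neg_mem hdr, -dc, pv_neg_mem hdc, ?_, ?_⟩
    · rw [PySem.List.mem_pyRange_one]; omega
    · rw [PySem.List.mem_pyRange_one]; omega
    · exact ⟨by omega, by omega, by omega, by omega⟩
    · obtain ⟨a, b⟩ := p; simp only [Prod.mk.injEq]; constructor <;> omega

lemma pv_dangerSet_nodup (board : List (List Int)) (n : Int) :
    (pvDangerSet board n).Nodup := by
  unfold pvDangerSet
  refine pv_nodup_foldl _ _ (fun s r hs => ?_) _ List.nodup_nil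
  refine pv_nodup_foldl _ _ (fun s c hs => ?_) _ hs
  split
  · refine pv_nodup_foldl _ _ (fun s dr hs => ?_) _ hs
    refine pv_nodup_foldl _ _ (fun s dc hs => ?_) _ hs
    show (if 0 ≤ r + dr ∧ r + dr < n ∧ 0 ≤ c + dc ∧ c + dc < n then
      PySem.Set.add s (r + dr, c + dc) else s).Nodup
    split
    · exact PySem.Set.nodup_add _ _ hs
    · exact hs
  · exact hs

lemma pv_len_dangerSet (board : List (List Int)) (n : Int) :
    (pvDangerSet board n).length = (pvGrid n).countP (fun q => pvDanger board n q.1 q.2) := by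
  have hperm : (pvDangerSet board n).Perm ((pvGrid n).filter (fun q => pvDanger board n q.1 q.2)) := by
    rw [List.perm_ext_iff_of_nodup (pv_dangerSet_nodup board n)
      (List.Nodup.filter _ (pvGrid_nodup n))]
    exact fun p => pv_dangerSet_iff_filter board n p
  rw [hperm.length_eq, List.countP_eq_length_filter]

-- a list splits into the cells satisfying a predicate and the rest
lemma pv_countP_split {α : Type} (l : List α) (p : α → Bool) :
    l.countP p + l.countP (fun x => ! p x) = l.length := by
  induction l with
  | nil => simp
  | cons x t ih => by_cases h : p x <;> simp [h] <;> omega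

lemma pv_solutionB_eq (board : List (List Int)) :
    solution_alt board = (board.length : Int) * board.length
      - ((pvGrid board.length).countP (fun q => pvDanger board board.length q.1 q.2) : Int) := by
  have h : solution_alt board
      = (board.length : Int) * board.length - (pvDangerSet board board.length).length := rfl
  rw [h, pv_len_dangerSet]

-- ===== VERDICT (by name: the statement is the Claim_ definition above) =====
theorem solution_spec : Claim_equal_solution := by
  intro board _ _
  unfold Spec_solution
  rw [pv_solutionA_eq, pv_solutionB_eq]
  have hlen := pvGrid_length (board.length : Int)
  have hsplit := pv_countP_split (pvGrid (board.length : Int))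
    (fun q => pvDanger board board.length q.1 q.2)
  simp only at hsplit
  have hll : (((pvGrid (board.length : Int)).length : Nat) : Int)
      = (board.length : Int) * board.length := by
    rw [hlen, Int.toNat_natCast]; push_cast; ring
  omega
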